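-- pv_equiv track=rewrite | github.com/seancrwhite/CSCI-440 | Modeler.py | seperate_actors
-- ===== SOURCE A (Python) =====
-- def seperate_actors(data):
--     # format actor data
--     actors = {}
--     for x in data:
--         if x[0] in actors:
--             actor_info = actors[x[0]]
--             actor_info[2] += 1
--             actor_info[3] += x[3]
--
--             actors.update({x[0]: actor_info})
--         else:
--             actors.update({x[0]: [x[1], x[2], 1, x[3]]})
--
--     # seperate living and deceased
--     actors_l = {}
--     actors_d = {}
--
--     for name in actors:
--         info = actors[name]
--         if info[1] is None: # If death date null, actor is alive
--             actors_l.update({name: [info[2], info[3], 0]})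
--
--         else: # Actor is dead
--             actors_d.update({name: [info[2], info[3], info[1] - info[0]]})
--
--     return actors_l, actors_d
-- ===== SOURCE B (Python) =====
-- def seperate_actors(data):
--     # Single pass: classify each actor on first sight and update the proper
--     # result dict on repeats; no intermediate aggregation table.
--     actors_l = {}
--     actors_d = {}
--     for name, birth, death, credits in data:
--         if name in actors_l:
--             info = actors_l[name]
--             info[0] += 1
--             info[1] += credits
--         elif name in actors_d:
--             info = actors_d[name]
--             info[0] += 1
--             info[1] += credits
--         elif death is None:
--             actors_l[name] = [1, credits, 0]
--         else:
--             actors_d[name] = [1, credits, death - birth]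
--     return actors_l, actors_d
-- ===== Notes on version B (the rewrite author's own statement) =====
-- stated objective: alternative
-- what changed: The two passes (aggregate into one dict, then scan it to split living/deceased) are fused into one loop that classifies each actor at first occurrence and updates the correct result dict directly, with no intermediate table.
import Mathlib
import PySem

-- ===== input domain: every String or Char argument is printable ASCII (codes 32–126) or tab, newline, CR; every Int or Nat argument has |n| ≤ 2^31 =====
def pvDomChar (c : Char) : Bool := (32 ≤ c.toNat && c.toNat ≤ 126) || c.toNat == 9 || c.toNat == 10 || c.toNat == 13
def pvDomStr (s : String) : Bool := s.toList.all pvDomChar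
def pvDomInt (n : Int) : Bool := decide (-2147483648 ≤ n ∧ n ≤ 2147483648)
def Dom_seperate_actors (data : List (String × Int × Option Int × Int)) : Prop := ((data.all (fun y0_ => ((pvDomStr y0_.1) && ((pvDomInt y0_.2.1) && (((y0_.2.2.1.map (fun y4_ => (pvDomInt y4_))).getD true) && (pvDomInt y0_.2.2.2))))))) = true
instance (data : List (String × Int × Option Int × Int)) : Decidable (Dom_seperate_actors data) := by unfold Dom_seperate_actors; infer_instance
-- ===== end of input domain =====

-- One honest line: B fuses A's two dict passes into one loop that classifies each
-- actor on first occurrence and updates the proper result dict on repeats (alternative decomposition, same cost).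

-- ===== PORT A =====
-- first loop of A: aggregate records into one dict name ↦ (birth, death, count, credit-sum)
def pvStepA (actors : PySem.Dict String (Int × Option Int × Int × Int))
    (x : String × Int × Option Int × Int) : PySem.Dict String (Int × Option Int × Int × Int) :=
  if actors.contains x.1 then
    let ai := actors.getD x.1 (0, none, 0, 0)   -- key present: getD is actors[x[0]]
    actors.insert x.1 (ai.1, ai.2.1, ai.2.2.1 + 1, ai.2.2.2 + x.2.2.2)
  else
    actors.insert x.1 (x.2.1, x.2.2.1, 1, x.2.2.2)

-- second loop of A: for name in actors, split by death date
def pvStepSplit (actors : PySem.Dict String (Int × Option Int × Int × Int))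
    (acc : PySem.Dict String (List Int) × PySem.Dict String (List Int)) (name : String) :
    PySem.Dict String (List Int) × PySem.Dict String (List Int) :=
  let info := actors.getD name (0, none, 0, 0)
  match info.2.1 with
  | none => (acc.1.insert name [info.2.2.1, info.2.2.2, 0], acc.2)
  | some dd => (acc.1, acc.2.insert name [info.2.2.1, info.2.2.2, dd - info.1])

def seperate_actors (data : List (String × Int × Option Int × Int)) :
    (List (String × List Int)) × (List (String × List Int)) :=
  let actors := data.foldl pvStepA PySem.Dict.empty
  let r := actors.keys.foldl (pvStepSplit actors) (PySem.Dict.empty, PySem.Dict.empty)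
  (r.1.items, r.2.items)

-- ===== PORT B =====
-- info[0] += 1; info[1] += credits  (in-place update of a 3-element list)
def pvBump (info : List Int) (credits : Int) : List Int :=
  match info with
  | c :: s :: rest => (c + 1) :: (s + credits) :: rest
  | other => other

def pvStepB (acc : PySem.Dict String (List Int) × PySem.Dict String (List Int))
    (x : String × Int × Option Int × Int) :
    PySem.Dict String (List Int) × PySem.Dict String (List Int) :=
  if acc.1.contains x.1 then
    (acc.1.insert x.1 (pvBump (acc.1.getD x.1 []) x.2.2.2), acc.2)
  else if acc.2.contains x.1 then
    (acc.1, acc.2.insert x.1 (pvBump (acc.2.getD x.1 []) x.2.2.2))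
  else
    match x.2.2.1 with
    | none => (acc.1.insert x.1 [1, x.2.2.2, 0], acc.2)
    | some dd => (acc.1, acc.2.insert x.1 [1, x.2.2.2, dd - x.2.1])

def seperate_actors_alt (data : List (String × Int × Option Int × Int)) :
    (List (String × List Int)) × (List (String × List Int)) :=
  let r := data.foldl pvStepB (PySem.Dict.empty, PySem.Dict.empty)
  (r.1.items, r.2.items)

-- ===== PRECONDITION & SPEC =====
def Spec_seperate_actors (data : List (String × Int × Option Int × Int)) (out : (List (String × List Int)) × (List (String × List Int))) : Prop := out = seperate_actors_alt data
instance (data : List (String × Int × Option Int × Int)) (out : (List (String × List Int)) × (List (String × List Int))) : Decidable (Spec_seperate_actors data out) := by unfold Spec_seperate_actors; infer_instance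

-- ===== CLAIM (what is proved, stated in full; the proofs are below) =====
def Claim_equal_seperate_actors : Prop := ∀ (data : List (String × Int × Option Int × Int)), Dom_seperate_actors data → Spec_seperate_actors data (seperate_actors data)

-- ===== LEMMAS AND PROOFS =====

-- the living-side / deceased-side projections of A's aggregation table
def pvLive (its : List (String × (Int × Option Int × Int × Int))) : List (String × List Int) :=
  its.filterMap (fun p => match p.2.2.1 with
    | none => some (p.1, [p.2.2.2.1, p.2.2.2.2, 0])
    | some _ => none)

def pvDead (its : List (String × (Int × Option Int × Int × Int))) : List (String × List Int) :=
  its.filterMap (fun p => match p.2.2.1 with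
    | none => none
    | some dd => some (p.1, [p.2.2.2.1, p.2.2.2.2, dd - p.2.1]))

lemma pvLive_append (xs ys : List (String × (Int × Option Int × Int × Int))) :
    pvLive (xs ++ ys) = pvLive xs ++ pvLive ys := by
  simp [pvLive]

lemma pvDead_append (xs ys : List (String × (Int × Option Int × Int × Int))) :
    pvDead (xs ++ ys) = pvDead xs ++ pvDead ys := by
  simp [pvDead]

lemma pvLive_keys_sublist (its : List (String × (Int × Option Int × Int × Int))) :
    ((pvLive its).map Prod.fst).Sublist (its.map Prod.fst) := by
  induction its with
  | nil => simp [pvLive]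
  | cons p rest ih =>
    rcases p with ⟨k, b, dd, c, s⟩
    cases dd <;> simp [pvLive] at ih ⊢
    · exact ih
    · exact ih.cons k

lemma pvDead_keys_sublist (its : List (String × (Int × Option Int × Int × Int))) :
    ((pvDead its).map Prod.fst).Sublist (its.map Prod.fst) := by
  induction its with
  | nil => simp [pvDead]
  | cons p rest ih =>
    rcases p with ⟨k, b, dd, c, s⟩
    cases dd <;> simp [pvDead] at ih ⊢
    · exact ih.cons k
    · exact ih

lemma pvLive_mem {its : List (String × (Int × Option Int × Int × Int))} {k : String}
    {b c s : Int} (h : (k, (b, (none : Option Int), c, s)) ∈ its) :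
    (k, ([c, s, 0] : List Int)) ∈ pvLive its := by
  simp only [pvLive, List.mem_filterMap]
  exact ⟨_, h, rfl⟩

lemma pvDead_mem {its : List (String × (Int × Option Int × Int × Int))} {k : String}
    {b dd c s : Int} (h : (k, (b, some dd, c, s)) ∈ its) :
    (k, ([c, s, dd - b] : List Int)) ∈ pvDead its := by
  simp only [pvDead, List.mem_filterMap]
  exact ⟨_, h, rfl⟩

lemma pvMem_unique {α β : Type} {l : List (α × β)} (hnd : (l.map Prod.fst).Nodup)
    {k : α} {v v' : β} (h : (k, v) ∈ l) (h' : (k, v') ∈ l) : v = v' := by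
  induction l with
  | nil => cases h
  | cons p rest ih =>
    simp only [List.map_cons, List.nodup_cons] at hnd
    rcases List.mem_cons.1 h with h1 | h1 <;> rcases List.mem_cons.1 h' with h2 | h2
    · simpa using h1.trans h2.symm
    · refine absurd ?_ hnd.1
      rw [← h1]
      show k ∈ rest.map Prod.fst
      exact List.mem_map_of_mem (f := Prod.fst) h2
    · refine absurd ?_ hnd.1
      rw [← h2]
      show k ∈ rest.map Prod.fst
      exact List.mem_map_of_mem (f := Prod.fst) h1
    · exact ih hnd.2 h1 h2

lemma pvNot_mem_live_keys {its : List (String × (Int × Option Int × Int × Int))}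
    (hnd : (its.map Prod.fst).Nodup) {k : String} {b dd c s : Int}
    (h : (k, (b, some dd, c, s)) ∈ its) : k ∉ (pvLive its).map Prod.fst := by
  intro hk
  obtain ⟨q, hq, hq1⟩ := List.mem_map.1 hk
  unfold pvLive at hq
  obtain ⟨p, hp, hm⟩ := List.mem_filterMap.1 hq
  rcases p with ⟨k', b', dd', c', s'⟩
  cases dd' with
  | some _ => simp at hm
  | none =>
    simp only [Option.some.injEq] at hm
    rw [← hm] at hq1
    simp only at hq1
    rw [hq1] at hp
    have := pvMem_unique hnd h hp
    simp at this

lemma pvUpd_live_none (k : String) (b c s cr : Int) :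
    ∀ its : List (String × (Int × Option Int × Int × Int)),
    (its.map Prod.fst).Nodup → (k, (b, (none : Option Int), c, s)) ∈ its →
    pvLive (its.map (fun p => if p.1 == k then (k, (b, (none : Option Int), c + 1, s + cr)) else p))
      = (pvLive its).map (fun q => if q.1 == k then (k, ([c + 1, s + cr, 0] : List Int)) else q)
    ∧ pvDead (its.map (fun p => if p.1 == k then (k, (b, (none : Option Int), c + 1, s + cr)) else p))
      = pvDead its := by
  intro its hnd hmem
  induction its with
  | nil => cases hmem
  | cons p rest ih =>
    simp only [List.map_cons, List.nodup_cons] at hnd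
    obtain ⟨hk, hnd'⟩ := hnd
    rcases List.mem_cons.1 hmem with h1 | h1
    · have hrest : rest.map (fun p => if p.1 == k then (k, (b, (none : Option Int), c + 1, s + cr)) else p) = rest := by
        have h : ∀ q ∈ rest, (if q.1 == k then (k, (b, (none : Option Int), c + 1, s + cr)) else q) = q := by
          intro q hq
          have hqk : q.1 ≠ k := by
            intro e
            apply hk
            rw [← h1]
            show k ∈ rest.map Prod.fst
            exact e ▸ List.mem_map_of_mem (f := Prod.fst) hq
          simp [hqk]
        rw [List.map_congr_left h]
        simp
      have htail : ∀ q ∈ pvLive rest, (if q.1 == k then (k, ([c + 1, s + cr, 0] : List Int)) else q) = q := by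
        intro q hq
        have hqk : q.1 ≠ k := by
          intro e
          apply hk
          rw [← h1]
          show k ∈ rest.map Prod.fst
          exact e ▸ (pvLive_keys_sublist rest).subset (List.mem_map_of_mem (f := Prod.fst) hq)
        simp [hqk]
      have hcong := (List.map_congr_left htail).trans
        (by simp : (pvLive rest).map (fun q => q) = pvLive rest)
      constructor
      · rw [← h1]
        simp only [List.map_cons]
        rw [hrest]
        simpa [pvLive] using hcong.symm
      · rw [← h1]
        simp only [List.map_cons]
        rw [hrest]
        simp [pvDead]
    · have hp1 : p.1 ≠ k := by
        intro e
        apply hk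
        rw [e]
        exact List.mem_map_of_mem (f := Prod.fst) h1
      obtain ⟨ihL, ihD⟩ := ih hnd' h1
      rcases p with ⟨k0, b0, dd0, c0, s0⟩
      simp only at hp1
      cases dd0 with
      | none =>
        exact ⟨by simpa [pvLive, hp1] using ihL, by simpa [pvDead, hp1] using ihD⟩
      | some d1 =>
        exact ⟨by simpa [pvLive, hp1] using ihL, by simpa [pvDead, hp1] using ihD⟩

lemma pvUpd_dead_some (k : String) (b d0 c s cr : Int) :
    ∀ its : List (String × (Int × Option Int × Int × Int)),
    (its.map Prod.fst).Nodup → (k, (b, some d0, c, s)) ∈ its →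
    pvLive (its.map (fun p => if p.1 == k then (k, (b, some d0, c + 1, s + cr)) else p))
      = pvLive its
    ∧ pvDead (its.map (fun p => if p.1 == k then (k, (b, some d0, c + 1, s + cr)) else p))
      = (pvDead its).map (fun q => if q.1 == k then (k, ([c + 1, s + cr, d0 - b] : List Int)) else q) := by
  intro its hnd hmem
  induction its with
  | nil => cases hmem
  | cons p rest ih =>
    simp only [List.map_cons, List.nodup_cons] at hnd
    obtain ⟨hk, hnd'⟩ := hnd
    rcases List.mem_cons.1 hmem with h1 | h1
    · have hrest : rest.map (fun p => if p.1 == k then (k, (b, some d0, c + 1, s + cr)) else p) = rest := by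
        have h : ∀ q ∈ rest, (if q.1 == k then (k, (b, some d0, c + 1, s + cr)) else q) = q := by
          intro q hq
          have hqk : q.1 ≠ k := by
            intro e
            apply hk
            rw [← h1]
            show k ∈ rest.map Prod.fst
            exact e ▸ List.mem_map_of_mem (f := Prod.fst) hq
          simp [hqk]
        rw [List.map_congr_left h]
        simp
      have htail : ∀ q ∈ pvDead rest, (if q.1 == k then (k, ([c + 1, s + cr, d0 - b] : List Int)) else q) = q := by
        intro q hq
        have hqk : q.1 ≠ k := by
          intro e
          apply hk
          rw [← h1]
          show k ∈ rest.map Prod.fst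
          exact e ▸ (pvDead_keys_sublist rest).subset (List.mem_map_of_mem (f := Prod.fst) hq)
        simp [hqk]
      have hcong := (List.map_congr_left htail).trans
        (by simp : (pvDead rest).map (fun q => q) = pvDead rest)
      constructor
      · rw [← h1]
        simp only [List.map_cons]
        rw [hrest]
        simp [pvLive]
      · rw [← h1]
        simp only [List.map_cons]
        rw [hrest]
        simpa [pvDead] using hcong.symm
    · have hp1 : p.1 ≠ k := by
        intro e
        apply hk
        rw [e]
        exact List.mem_map_of_mem (f := Prod.fst) h1
      obtain ⟨ihL, ihD⟩ := ih hnd' h1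
      rcases p with ⟨k0, b0, dd0, c0, s0⟩
      simp only at hp1
      cases dd0 with
      | none =>
        exact ⟨by simpa [pvLive, hp1] using ihL, by simpa [pvDead, hp1] using ihD⟩
      | some d1 =>
        exact ⟨by simpa [pvLive, hp1] using ihL, by simpa [pvDead, hp1] using ihD⟩

lemma pvStep_comm (a : PySem.Dict String (Int × Option Int × Int × Int))
    (x : String × Int × Option Int × Int) (hnd : a.keys.Nodup) :
    pvStepB (PySem.Dict.mk (pvLive a.items), PySem.Dict.mk (pvDead a.items)) x
      = (PySem.Dict.mk (pvLive ((pvStepA a x).items)), PySem.Dict.mk (pvDead ((pvStepA a x).items))) := by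
  rcases x with ⟨k, b, dd, cr⟩
  have hndI : (a.items.map Prod.fst).Nodup := hnd
  cases hget : a.get? k with
  | none =>
    have hknot : k ∉ a.items.map Prod.fst :=
      (PySem.Dict.get?_eq_none_iff_not_mem_keys a k).1 hget
    have hcA : a.contains k = false := by
      rw [PySem.Dict.contains_eq_isSome_get?, hget]; rfl
    have hcL : (PySem.Dict.mk (pvLive a.items)).contains k = false := by
      rw [PySem.Dict.contains_eq_decide_mem_keys]
      simp only [decide_eq_false_iff_not]
      exact fun h => hknot ((pvLive_keys_sublist _).subset h)
    have hcD : (PySem.Dict.mk (pvDead a.items)).contains k = false := by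
      rw [PySem.Dict.contains_eq_decide_mem_keys]
      simp only [decide_eq_false_iff_not]
      exact fun h => hknot ((pvDead_keys_sublist _).subset h)
    unfold pvStepA pvStepB
    simp only [hcA, hcL, hcD, Bool.false_eq_true, if_false]
    cases dd with
    | none =>
      refine Prod.ext ?_ ?_ <;> apply PySem.Dict.ext
      · rw [PySem.Dict.items_insert_of_not_contains _ _ hcL,
            PySem.Dict.items_insert_of_not_contains _ _ hcA]
        show _ = pvLive (a.items ++ [(k, (b, none, 1, cr))])
        rw [pvLive_append]
        simp [pvLive]
      · rw [PySem.Dict.items_insert_of_not_contains _ _ hcA]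
        show _ = pvDead (a.items ++ [(k, (b, none, 1, cr))])
        rw [pvDead_append]
        simp [pvDead]
    | some d1 =>
      refine Prod.ext ?_ ?_ <;> apply PySem.Dict.ext
      · rw [PySem.Dict.items_insert_of_not_contains _ _ hcA]
        show _ = pvLive (a.items ++ [(k, (b, some d1, 1, cr))])
        rw [pvLive_append]
        simp [pvLive]
      · rw [PySem.Dict.items_insert_of_not_contains _ _ hcD,
            PySem.Dict.items_insert_of_not_contains _ _ hcA]
        show _ = pvDead (a.items ++ [(k, (b, some d1, 1, cr))])
        rw [pvDead_append]
        simp [pvDead]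
  | some v =>
    rcases v with ⟨b0, dd0, c, s⟩
    have hcA : a.contains k = true := by
      rw [PySem.Dict.contains_eq_isSome_get?, hget]; rfl
    have hmem : (k, (b0, dd0, c, s)) ∈ a.items := PySem.Dict.mem_items_of_get?_eq_some a hget
    have hgetD : a.getD k (0, none, 0, 0) = (b0, dd0, c, s) :=
      PySem.Dict.getD_of_get?_eq_some a _ hget
    unfold pvStepA pvStepB
    simp only [hcA, if_true, hgetD]
    cases dd0 with
    | none =>
      have hmemL : (k, ([c, s, 0] : List Int)) ∈ pvLive a.items := pvLive_mem hmem
      have hndL : ((pvLive a.items).map Prod.fst).Nodup :=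
        (pvLive_keys_sublist a.items).nodup hndI
      have hcL : (PySem.Dict.mk (pvLive a.items)).contains k = true := by
        rw [PySem.Dict.contains_eq_decide_mem_keys]
        exact decide_eq_true (List.mem_map_of_mem (f := Prod.fst) hmemL)
      have hgL : (PySem.Dict.mk (pvLive a.items)).getD k [] = [c, s, 0] :=
        PySem.Dict.getD_of_mem_items _ hmemL hndL []
      obtain ⟨hL, hD⟩ := pvUpd_live_none k b0 c s cr a.items hndI hmem
      simp only [hcL, if_true, hgL]
      refine Prod.ext ?_ ?_ <;> apply PySem.Dict.ext
      · rw [PySem.Dict.items_insert_of_contains _ _ hcL,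
            PySem.Dict.items_insert_of_contains _ _ hcA]
        show _ = pvLive (List.map _ a.items)
        rw [hL]
        rfl
      · show pvDead a.items = pvDead ((a.insert k (b0, none, c + 1, s + cr)).items)
        rw [PySem.Dict.items_insert_of_contains _ _ hcA]
        exact hD.symm
    | some d1 =>
      have hmemD : (k, ([c, s, d1 - b0] : List Int)) ∈ pvDead a.items := pvDead_mem hmem
      have hndD : ((pvDead a.items).map Prod.fst).Nodup :=
        (pvDead_keys_sublist a.items).nodup hndI
      have hcL : (PySem.Dict.mk (pvLive a.items)).contains k = false := by
        rw [PySem.Dict.contains_eq_decide_mem_keys]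
        simp only [decide_eq_false_iff_not]
        exact pvNot_mem_live_keys hndI hmem
      have hcD : (PySem.Dict.mk (pvDead a.items)).contains k = true := by
        rw [PySem.Dict.contains_eq_decide_mem_keys]
        exact decide_eq_true (List.mem_map_of_mem (f := Prod.fst) hmemD)
      have hgD : (PySem.Dict.mk (pvDead a.items)).getD k [] = [c, s, d1 - b0] :=
        PySem.Dict.getD_of_mem_items _ hmemD hndD []
      obtain ⟨hL, hD⟩ := pvUpd_dead_some k b0 d1 c s cr a.items hndI hmem
      simp only [hcL, hcD, Bool.false_eq_true, if_false, if_true, hgD]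
      refine Prod.ext ?_ ?_ <;> apply PySem.Dict.ext
      · show pvLive a.items = pvLive ((a.insert k (b0, some d1, c + 1, s + cr)).items)
        rw [PySem.Dict.items_insert_of_contains _ _ hcA]
        exact hL.symm
      · rw [PySem.Dict.items_insert_of_contains _ _ hcD,
            PySem.Dict.items_insert_of_contains _ _ hcA]
        show _ = pvDead (List.map _ a.items)
        rw [hD]
        rfl

lemma pvNodup_stepA (a : PySem.Dict String (Int × Option Int × Int × Int))
    (x : String × Int × Option Int × Int) (h : a.keys.Nodup) : (pvStepA a x).keys.Nodup := by
  unfold pvStepA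
  split <;> exact PySem.Dict.nodup_keys_insert _ _ _ h

lemma pvInvMain : ∀ (data : List (String × Int × Option Int × Int))
    (a : PySem.Dict String (Int × Option Int × Int × Int)), a.keys.Nodup →
    data.foldl pvStepB (PySem.Dict.mk (pvLive a.items), PySem.Dict.mk (pvDead a.items))
      = (PySem.Dict.mk (pvLive ((data.foldl pvStepA a).items)),
         PySem.Dict.mk (pvDead ((data.foldl pvStepA a).items))) := by
  intro data
  induction data with
  | nil => intro a _; rfl
  | cons x rest ih =>
    intro a hnd
    simp only [List.foldl_cons, pvStep_comm a x hnd]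
    exact ih _ (pvNodup_stepA a x hnd)

lemma pvLoop2_gen (a : PySem.Dict String (Int × Option Int × Int × Int)) :
    ∀ (ks : List String) (l0 d0 : PySem.Dict String (List Int)), ks.Nodup →
    (∀ k ∈ ks, k ∉ l0.keys ∧ k ∉ d0.keys) →
    ks.foldl (pvStepSplit a) (l0, d0)
      = (PySem.Dict.mk (l0.items ++ pvLive (ks.map (fun k => (k, a.getD k (0, none, 0, 0))))),
         PySem.Dict.mk (d0.items ++ pvDead (ks.map (fun k => (k, a.getD k (0, none, 0, 0)))))) := by
  intro ks
  induction ks with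
  | nil =>
    intro l0 d0 _ _
    refine Prod.ext ?_ ?_ <;> apply PySem.Dict.ext <;> simp [pvLive, pvDead]
  | cons k ks ih =>
    intro l0 d0 hnodup hdisj
    obtain ⟨hk1, hkrest⟩ := List.nodup_cons.1 hnodup
    obtain ⟨hkl, hkd⟩ := hdisj k (List.mem_cons_self)
    have hcl : l0.contains k = false := by
      rw [PySem.Dict.contains_eq_decide_mem_keys]
      simp [hkl]
    have hcd : d0.contains k = false := by
      rw [PySem.Dict.contains_eq_decide_mem_keys]
      simp [hkd]
    simp only [List.foldl_cons]
    rcases hEq : a.getD k (0, none, 0, 0) with ⟨b, dd, c, s⟩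
    cases dd with
    | none =>
      have hstep : pvStepSplit a (l0, d0) k = (l0.insert k [c, s, 0], d0) := by
        unfold pvStepSplit
        rw [hEq]
      rw [hstep, ih (l0.insert k [c, s, 0]) d0 hkrest ?_]
      · refine Prod.ext ?_ ?_ <;> apply PySem.Dict.ext
        · show (l0.insert k [c, s, 0]).items ++ _ = _
          rw [PySem.Dict.items_insert_of_not_contains _ _ hcl]
          simp [pvLive, hEq]
        · show d0.items ++ _ = _
          simp [pvDead, hEq]
      · intro k' hk'
        obtain ⟨h1, h2⟩ := hdisj k' (List.mem_cons_of_mem _ hk')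
        refine ⟨?_, h2⟩
        rw [PySem.Dict.keys_insert_of_not_contains _ _ hcl]
        simp only [List.mem_append, List.mem_singleton]
        rintro (h | h)
        · exact h1 h
        · exact hk1 (h ▸ hk')
    | some d1 =>
      have hstep : pvStepSplit a (l0, d0) k = (l0, d0.insert k [c, s, d1 - b]) := by
        unfold pvStepSplit
        rw [hEq]
      rw [hstep, ih l0 (d0.insert k [c, s, d1 - b]) hkrest ?_]
      · refine Prod.ext ?_ ?_ <;> apply PySem.Dict.ext
        · show l0.items ++ _ = _
          simp [pvLive, hEq]
        · show (d0.insert k [c, s, d1 - b]).items ++ _ = _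
          rw [PySem.Dict.items_insert_of_not_contains _ _ hcd]
          simp [pvDead, hEq]
      · intro k' hk'
        obtain ⟨h1, h2⟩ := hdisj k' (List.mem_cons_of_mem _ hk')
        refine ⟨h1, ?_⟩
        rw [PySem.Dict.keys_insert_of_not_contains _ _ hcd]
        simp only [List.mem_append, List.mem_singleton]
        rintro (h | h)
        · exact h2 h
        · exact hk1 (h ▸ hk')

lemma pvNodup_foldlA (data : List (String × Int × Option Int × Int)) :
    (data.foldl pvStepA PySem.Dict.empty).keys.Nodup := by
  suffices h : ∀ (l : List (String × Int × Option Int × Int))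
      (a : PySem.Dict String (Int × Option Int × Int × Int)), a.keys.Nodup →
      (l.foldl pvStepA a).keys.Nodup by
    exact h data _ PySem.Dict.nodup_keys_empty
  intro l
  induction l with
  | nil => intro a h; exact h
  | cons x rest ih => intro a h; exact ih _ (pvNodup_stepA a x h)

-- ===== VERDICT (by name: the statement is the Claim_ definition above) =====
theorem seperate_actors_spec : Claim_equal_seperate_actors := by
  intro data _
  show seperate_actors data = seperate_actors_alt data
  have hnd := pvNodup_foldlA data
  have e2 : seperate_actors_alt data
      = (pvLive ((data.foldl pvStepA PySem.Dict.empty).items),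
         pvDead ((data.foldl pvStepA PySem.Dict.empty).items)) :=
    congrArg (fun r => (r.1.items, r.2.items))
      (pvInvMain data PySem.Dict.empty PySem.Dict.nodup_keys_empty)
  have e1 : seperate_actors data
      = ([] ++ pvLive ((data.foldl pvStepA PySem.Dict.empty).keys.map
            (fun k => (k, (data.foldl pvStepA PySem.Dict.empty).getD k (0, none, 0, 0)))),
         [] ++ pvDead ((data.foldl pvStepA PySem.Dict.empty).keys.map
            (fun k => (k, (data.foldl pvStepA PySem.Dict.empty).getD k (0, none, 0, 0))))) :=
    congrArg (fun r => (r.1.items, r.2.items))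
      (pvLoop2_gen _ _ PySem.Dict.empty PySem.Dict.empty hnd (by simp))
  rw [e1, e2, ← PySem.Dict.items_eq_map_keys _ hnd (0, none, 0, 0)]
  simp
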